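-- pv_equiv track=rewrite | github.com/mot11/NLP100knock | Chapter_4/knock39.py | freq_zipf
-- ===== SOURCE A (Python) =====
-- def freq_zipf(input_list):
--     """単語の出現頻度順とその出現頻度をリスト化
--
--     :param input_list:
--         単語の出現頻度を格納したリスト。
--     :return:
--         output: 単語の出現頻度順とその出現頻度を格納したリスト。
--     """
--
--     output = []
--
--     for i, item in enumerate(input_list):
--         if len(output) > 0:
--             if str(output[len(output) - 1][1]) != str(item):
--                 output.append([i + 1, item])
--         else:
--             output.append([i + 1, item])
--
--     return output
-- ===== SOURCE B (Python) =====
-- def freq_zipf(input_list):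
--     """Run-skipping two-pointer version: emit the head of each maximal run of
--     str-equal consecutive items with its 1-based rank, then jump past the run."""
--     output = []
--     n = len(input_list)
--     i = 0
--     while i < n:
--         item = input_list[i]
--         output.append([i + 1, item])
--         j = i + 1
--         while j < n and str(input_list[j]) == str(item):
--             j += 1
--         i = j
--     return output
-- ===== Notes on version B (the rewrite author's own statement) =====
-- stated objective: alternative
-- what changed: A does one pass appending an element whenever its str differs from the last appended element's str; B is a two-pointer run-skipper: it emits the head of each maximal run of consecutive str-equal items and jumps its index past the whole run, never inspecting the output list.
import Mathlib
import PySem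

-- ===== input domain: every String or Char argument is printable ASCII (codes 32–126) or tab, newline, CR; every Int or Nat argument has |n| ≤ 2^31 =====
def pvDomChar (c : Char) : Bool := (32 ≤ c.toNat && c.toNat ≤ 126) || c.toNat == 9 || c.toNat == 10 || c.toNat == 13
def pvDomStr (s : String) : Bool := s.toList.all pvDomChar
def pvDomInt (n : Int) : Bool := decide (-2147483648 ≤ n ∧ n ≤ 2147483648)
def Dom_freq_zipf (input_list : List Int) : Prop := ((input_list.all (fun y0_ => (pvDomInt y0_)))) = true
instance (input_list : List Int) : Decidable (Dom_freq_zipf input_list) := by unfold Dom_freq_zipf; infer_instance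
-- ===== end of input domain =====

-- B replaces A's "append when str differs from the last appended element" pass by a
-- two-pointer run-skipper (emit the head of each maximal run, jump past the run); objective: alternative.

-- ===== PORT A =====
-- one step of A's loop body: compare str(output[-1][1]) with str(item), append [i+1, item] when they differ
def pvStepA (output : List (List Int)) (p : Int × Int) : List (List Int) :=
  if output.length > 0 then
    if PySem.Int.toStr (PySem.List.pyGetD (PySem.List.pyGetD output ((output.length : Int) - 1) []) 1 0)
        ≠ PySem.Int.toStr p.2 then
      output ++ [[p.1 + 1, p.2]]
    else output
  else output ++ [[p.1 + 1, p.2]]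

def freq_zipf (input_list : List Int) : List (List Int) :=
  (PySem.List.enumerate input_list 0).foldl pvStepA []

-- ===== PORT B =====
-- inner while loop of B: advance past the run of items whose str equals s
def pvSkipRun (s : String) : List (Int × Int) → List (Int × Int)
  | [] => []
  | (i, x) :: rest => if PySem.Int.toStr x = s then pvSkipRun s rest else (i, x) :: rest

theorem pvSkipRun_length_le (s : String) (l : List (Int × Int)) :
    (pvSkipRun s l).length ≤ l.length := by
  induction l with
  | nil => simp [pvSkipRun]
  | cons p rest ih =>
    obtain ⟨i, x⟩ := p
    simp only [pvSkipRun]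
    split
    · exact Nat.le_succ_of_le ih
    · exact Nat.le_refl _

-- outer while loop of B: emit the head of the current run, then skip the run
def pvAltGo : List (Int × Int) → List (List Int)
  | [] => []
  | (i, x) :: rest => [i + 1, x] :: pvAltGo (pvSkipRun (PySem.Int.toStr x) rest)
termination_by l => l.length
decreasing_by exact Nat.lt_succ_of_le (pvSkipRun_length_le _ _)

def freq_zipf_alt (input_list : List Int) : List (List Int) :=
  pvAltGo (PySem.List.enumerate input_list 0)

-- ===== PRECONDITION & SPEC =====
def Spec_freq_zipf (input_list : List Int) (out : List (List Int)) : Prop := out = freq_zipf_alt input_list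
instance (input_list : List Int) (out : List (List Int)) : Decidable (Spec_freq_zipf input_list out) := by unfold Spec_freq_zipf; infer_instance

-- ===== CLAIM (what is proved, stated in full; the proofs are below) =====
def Claim_equal_freq_zipf : Prop := ∀ (input_list : List Int), Dom_freq_zipf input_list → Spec_freq_zipf input_list (freq_zipf input_list)

-- ===== LEMMAS AND PROOFS =====

theorem pvStepA_nonempty (acc : List (List Int)) (j y : Int) (p : Int × Int) :
    pvStepA (acc ++ [[j, y]]) p =
      if PySem.Int.toStr y ≠ PySem.Int.toStr p.2 then (acc ++ [[j, y]]) ++ [[p.1 + 1, p.2]]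
      else acc ++ [[j, y]] := by
  have hlen : (acc ++ [[j, y]]).length = acc.length + 1 := by simp
  have hget : PySem.List.pyGetD (acc ++ [[j, y]]) (((acc ++ [[j, y]]).length : Int) - 1) [] = [j, y] := by
    rw [hlen]
    have : ((acc.length + 1 : Nat) : Int) - 1 = ((acc.length : Nat) : Int) := by push_cast; ring
    rw [this, PySem.List.pyGetD_natCast]
    simp
  simp only [pvStepA, hlen]
  simp [PySem.List.pyGetD]

theorem pvFold_invariant (ps : List (Int × Int)) :
    ∀ (acc : List (List Int)) (j y : Int),
      ps.foldl pvStepA (acc ++ [[j, y]]) =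
        (acc ++ [[j, y]]) ++ pvAltGo (pvSkipRun (PySem.Int.toStr y) ps) := by
  induction ps with
  | nil => intro acc j y; simp [pvSkipRun, pvAltGo]
  | cons p rest ih =>
    intro acc j y
    obtain ⟨i, x⟩ := p
    simp only [List.foldl_cons, pvStepA_nonempty]
    by_cases h : PySem.Int.toStr x = PySem.Int.toStr y
    · simp only [h, ne_eq, not_true_eq_false, ite_false]
      rw [ih acc j y]
      simp [pvSkipRun, h]
    · have hne : PySem.Int.toStr y ≠ PySem.Int.toStr x := fun hh => h hh.symm
      simp only [ne_eq, hne, not_false_eq_true, if_pos]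
      rw [ih (acc ++ [[j, y]]) (i + 1) x]
      simp [pvSkipRun, pvAltGo, h]

-- ===== VERDICT (by name: the statement is the Claim_ definition above) =====
theorem freq_zipf_spec : Claim_equal_freq_zipf := by
  intro input_list _
  unfold Spec_freq_zipf freq_zipf freq_zipf_alt
  cases input_list with
  | nil => simp [PySem.List.enumerate, pvAltGo]
  | cons a rest =>
    rw [PySem.List.enumerate_cons]
    simp only [List.foldl_cons, pvStepA, List.length_nil, List.nil_append]
    norm_num
    have := pvFold_invariant (PySem.List.enumerate rest (0 + 1)) [] (0 + 1) a
    simp only [List.nil_append] at this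
    rw [pvAltGo]
    norm_num at this ⊢
    exact this
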